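-- pv_equiv track=rewrite | github.com/claudlos/Kryptos | kryptos/runtime.py | _ordered_values
-- ===== SOURCE A (Python) =====
-- from typing import Any
--
-- def _ordered_values(values: list[Any], preferred: list[Any]) -> list[Any]:
--     preferred_index = {value: index for index, value in enumerate(preferred)}
--     ordered = sorted(
--         enumerate(values),
--         key=lambda item: (
--             0 if item[1] in preferred_index else 1,
--             preferred_index.get(item[1], item[0]),
--             item[0],
--         ),
--     )
--     return [value for _index, value in ordered]
-- ===== SOURCE B (Python) =====
-- from typing import Any
--
-- def _ordered_values(values: list[Any], preferred: list[Any]) -> list[Any]: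
--     preferred_index = {value: index for index, value in enumerate(preferred)}
--     buckets = [[] for _ in preferred]
--     non_preferred = []
--     for value in values:
--         rank = preferred_index.get(value)
--         if rank is None:
--             non_preferred.append(value)
--         else:
--             buckets[rank].append(value)
--     out = []
--     for bucket in buckets:
--         out.extend(bucket)
--     out.extend(non_preferred)
--     return out
-- ===== Notes on version B (the rewrite author's own statement) =====
-- stated objective: alternative
-- what changed: Replaces the comparison sort under a three-component tuple key by a single pass that distributes each value into a per-rank bucket (or a non-preferred tail) and concatenates the buckets in rank order.
import Mathlib
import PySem

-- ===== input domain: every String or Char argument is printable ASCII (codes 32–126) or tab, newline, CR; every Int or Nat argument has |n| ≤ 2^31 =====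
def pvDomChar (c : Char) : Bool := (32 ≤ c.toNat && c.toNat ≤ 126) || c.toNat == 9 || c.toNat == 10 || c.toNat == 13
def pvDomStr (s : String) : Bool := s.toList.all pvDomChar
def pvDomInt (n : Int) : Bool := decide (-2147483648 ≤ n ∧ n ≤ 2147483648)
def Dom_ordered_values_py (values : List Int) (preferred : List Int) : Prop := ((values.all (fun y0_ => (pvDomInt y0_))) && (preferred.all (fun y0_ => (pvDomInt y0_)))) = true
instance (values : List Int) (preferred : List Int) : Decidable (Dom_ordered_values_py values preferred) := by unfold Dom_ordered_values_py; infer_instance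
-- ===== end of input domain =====

-- B replaces A's comparison sort under a three-component key by a single-pass
-- distribution into per-rank buckets (plus a non-preferred tail), concatenated in
-- rank order — same return value by a different algorithm (objective: alternative).

-- ===== PORT A =====
-- the dict comprehension {value: index for index, value in enumerate(preferred)} (shared by both Pythons verbatim)
def pidx (preferred : List Int) : PySem.Dict Int Int :=
  (PySem.List.enumerate preferred).foldl (fun d p => d.insert p.2 p.1) PySem.Dict.empty

-- A's key lambda: (0 if item[1] in preferred_index else 1, preferred_index.get(item[1], item[0]), item[0]) — Python tuple order is lexicographic = ×ₗ
def okeyFlag (pi : PySem.Dict Int Int) (v : Int) : Int :=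
  if pi.contains v then 0 else 1
def okey (pi : PySem.Dict Int Int) (p : Int × Int) : Int ×ₗ Int ×ₗ Int :=
  toLex (okeyFlag pi p.2, toLex (pi.getD p.2 p.1, p.1))

def ordered_values_py (values : List Int) (preferred : List Int) : List Int :=
  let preferred_index := pidx preferred
  let ordered := PySem.List.sorted (PySem.List.enumerate values) (okey preferred_index)
  ordered.map (·.2)

-- ===== PORT B =====
-- the loop body of Source B: append v to buckets[rank] or to the non_preferred tail
def ovStep (pi : PySem.Dict Int Int) (s : List (List Int) × List Int) (v : Int) :
    List (List Int) × List Int :=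
  match pi.get? v with
  | none => (s.1, s.2 ++ [v])
  | some r => (s.1.set r.toNat (s.1.getD r.toNat [] ++ [v]), s.2)

def ordered_values_py_alt (values : List Int) (preferred : List Int) : List Int :=
  let preferred_index := pidx preferred
  let s := values.foldl (ovStep preferred_index) (preferred.map (fun _ => ([] : List Int)), [])
  s.1.foldl (fun acc b => acc ++ b) [] ++ s.2

-- ===== PRECONDITION & SPEC =====
def Spec_ordered_values_py (values : List Int) (preferred : List Int) (out : List Int) : Prop := out = ordered_values_py_alt values preferred
instance (values : List Int) (preferred : List Int) (out : List Int) : Decidable (Spec_ordered_values_py values preferred out) := by unfold Spec_ordered_values_py; infer_instance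

-- ===== CLAIM (what is proved, stated in full; the proofs are below) =====
def Claim_equal_ordered_values_py : Prop := ∀ (values : List Int) (preferred : List Int), Dom_ordered_values_py values preferred → Spec_ordered_values_py values preferred (ordered_values_py values preferred)

-- ===== LEMMAS AND PROOFS =====

-- last-write-wins provenance of the dict built by the fold of inserts
theorem pidx_foldl_get? (l : List (Int × Int)) (d : PySem.Dict Int Int) (v r : Int)
    (h : (l.foldl (fun d p => d.insert p.2 p.1) d).get? v = some r) :
    d.get? v = some r ∨ (r, v) ∈ l := by
  induction l generalizing d with
  | nil => exact Or.inl h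
  | cons p t ih =>
    rcases ih (d.insert p.2 p.1) h with h' | h'
    · rw [PySem.Dict.get?_insert] at h'
      split at h'
      · right
        have : p.1 = r := by injection h'
        subst this
        subst_vars
        exact List.mem_cons_self
      · exact Or.inl h'
    · exact Or.inr (List.mem_cons_of_mem _ h')

-- every rank stored in pidx is a valid index of preferred
theorem pidx_rank (preferred : List Int) (v r : Int)
    (h : (pidx preferred).get? v = some r) :
    ∃ n : Nat, n < preferred.length ∧ r = (n : Int) := by
  rcases pidx_foldl_get? _ _ _ _ h with h' | h'
  · simp [PySem.Dict.get?_empty] at h'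
  · rcases (PySem.List.mem_enumerate_iff _ _ _).1 h' with ⟨k, hk, hp⟩
    exact ⟨k, hk, by simpa using congrArg Prod.fst hp⟩

theorem okey_of_some (pi : PySem.Dict Int Int) (p : Int × Int) (r : Int)
    (h : pi.get? p.2 = some r) :
    okey pi p = toLex ((0:Int), toLex (r, p.1)) := by
  have hc : pi.contains p.2 = true := by
    rw [PySem.Dict.contains_eq_isSome_get?, h]; rfl
  unfold okey okeyFlag
  rw [hc, PySem.Dict.getD_of_get?_eq_some _ _ h]
  simp

theorem okey_of_none (pi : PySem.Dict Int Int) (p : Int × Int)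
    (h : pi.get? p.2 = none) :
    okey pi p = toLex ((1:Int), toLex (p.1, p.1)) := by
  have hc : pi.contains p.2 = false := by
    rw [PySem.Dict.contains_eq_isSome_get?, h]; rfl
  unfold okey okeyFlag
  rw [hc, PySem.Dict.getD_of_get?_eq_none _ _ h]
  simp

-- map snd of a filter-on-snd of an enumeration
theorem enum_filter_snd (q : Int → Bool) (vs : List Int) : ∀ s : Int,
    ((PySem.List.enumerate vs s).filter (fun p => q p.2)).map (·.2) = vs.filter q := by
  induction vs with
  | nil => intro s; simp [PySem.List.enumerate_nil]
  | cons v t ih =>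
    intro s
    rw [PySem.List.enumerate_cons]
    by_cases h : q v = true <;> simp [h, ih]

-- the canonical rearrangement: buckets in rank order, then the non-preferred tail
def bucketed (pi : PySem.Dict Int Int) (N : Nat) (E : List (Int × Int)) : List (Int × Int) :=
  (List.range N).flatMap (fun (n : Nat) => E.filter (fun p => pi.get? p.2 == some (n : Int))) ++
    E.filter (fun p => pi.get? p.2 == none)

-- comparison facts about A's key, phrased through get? outcomes
theorem okey_lt_some_some (pi : PySem.Dict Int Int) (a b : Int × Int) (ra rb : Int)
    (ha : pi.get? a.2 = some ra) (hb : pi.get? b.2 = some rb)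
    (h : ra < rb ∨ (ra = rb ∧ a.1 < b.1)) : okey pi a < okey pi b := by
  rw [okey_of_some _ _ _ ha, okey_of_some _ _ _ hb, Prod.Lex.toLex_lt_toLex]
  refine Or.inr ⟨rfl, ?_⟩
  rw [Prod.Lex.toLex_lt_toLex]
  rcases h with h | ⟨h1, h2⟩
  · exact Or.inl h
  · exact Or.inr ⟨h1, h2⟩

theorem okey_lt_some_none (pi : PySem.Dict Int Int) (a b : Int × Int) (ra : Int)
    (ha : pi.get? a.2 = some ra) (hb : pi.get? b.2 = none) : okey pi a < okey pi b := by
  rw [okey_of_some _ _ _ ha, okey_of_none _ _ hb, Prod.Lex.toLex_lt_toLex]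
  exact Or.inl (by norm_num)

theorem okey_lt_none_none (pi : PySem.Dict Int Int) (a b : Int × Int)
    (ha : pi.get? a.2 = none) (hb : pi.get? b.2 = none) (h : a.1 < b.1) :
    okey pi a < okey pi b := by
  rw [okey_of_none _ _ ha, okey_of_none _ _ hb, Prod.Lex.toLex_lt_toLex]
  exact Or.inr ⟨rfl, by rw [Prod.Lex.toLex_lt_toLex]; exact Or.inl h⟩

-- the rank-bucket part alone is pairwise strictly key-increasing
theorem buckets_pairwise (pi : PySem.Dict Int Int) (E : List (Int × Int))
    (hE : E.Pairwise (fun p q => p.1 < q.1)) (N : Nat) :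
    ((List.range N).flatMap
      (fun (n : Nat) => E.filter (fun p => pi.get? p.2 == some (n : Int)))).Pairwise
      (fun a b => okey pi a < okey pi b) := by
  induction N with
  | zero => simp
  | succ N ih =>
    rw [List.range_succ, List.flatMap_append, List.pairwise_append]
    refine ⟨ih, ?_, ?_⟩
    · simp only [List.flatMap_cons, List.flatMap_nil, List.append_nil]
      refine (hE.filter _).imp_of_mem ?_
      intro a b ha hb hlt
      have ha' : pi.get? a.2 = some (N : Int) := by
        have := (List.mem_filter.1 ha).2; simpa using this
      have hb' : pi.get? b.2 = some (N : Int) := by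
        have := (List.mem_filter.1 hb).2; simpa using this
      exact okey_lt_some_some _ _ _ _ _ ha' hb' (Or.inr ⟨rfl, hlt⟩)
    · intro a ha b hb
      simp only [List.flatMap_cons, List.flatMap_nil, List.append_nil] at hb
      rcases List.mem_flatMap.1 ha with ⟨m, hm, ha'⟩
      have ham : pi.get? a.2 = some (m : Int) := by
        have := (List.mem_filter.1 ha').2; simpa using this
      have hbN : pi.get? b.2 = some (N : Int) := by
        have := (List.mem_filter.1 hb).2; simpa using this
      refine okey_lt_some_some _ _ _ _ _ ham hbN (Or.inl ?_)
      exact_mod_cast List.mem_range.1 hm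

theorem bucketed_pairwise (preferred : List Int) (E : List (Int × Int))
    (hE : E.Pairwise (fun p q => p.1 < q.1)) :
    (bucketed (pidx preferred) preferred.length E).Pairwise
      (fun a b => okey (pidx preferred) a < okey (pidx preferred) b) := by
  unfold bucketed
  rw [List.pairwise_append]
  refine ⟨buckets_pairwise _ _ hE _, ?_, ?_⟩
  · refine (hE.filter _).imp_of_mem ?_
    intro a b ha hb hlt
    have ha' : (pidx preferred).get? a.2 = none := by
      have := (List.mem_filter.1 ha).2; simpa using this
    have hb' : (pidx preferred).get? b.2 = none := by
      have := (List.mem_filter.1 hb).2; simpa using this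
    exact okey_lt_none_none _ _ _ ha' hb' hlt
  · intro a ha b hb
    rcases List.mem_flatMap.1 ha with ⟨m, _, ha'⟩
    have ham : (pidx preferred).get? a.2 = some (m : Int) := by
      have := (List.mem_filter.1 ha').2; simpa using this
    have hbn : (pidx preferred).get? b.2 = none := by
      have := (List.mem_filter.1 hb).2; simpa using this
    exact okey_lt_some_none _ _ _ _ ham hbn

theorem bucketed_perm (preferred : List Int) (E : List (Int × Int))
    (hE : E.Pairwise (fun p q => p.1 < q.1)) :
    (bucketed (pidx preferred) preferred.length E).Perm E := by
  have hnd : (bucketed (pidx preferred) preferred.length E).Nodup :=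
    (bucketed_pairwise preferred E hE).imp (fun {a b} h => fun he => by subst he; exact lt_irrefl _ h)
  have hndE : E.Nodup := hE.imp (fun {a b} h => by intro he; subst he; exact lt_irrefl _ h)
  rw [List.perm_ext_iff_of_nodup hnd hndE]
  intro p
  constructor
  · intro hp
    rcases List.mem_append.1 hp with hp | hp
    · rcases List.mem_flatMap.1 hp with ⟨m, _, hp'⟩
      exact (List.mem_filter.1 hp').1
    · exact (List.mem_filter.1 hp).1
  · intro hp
    unfold bucketed
    cases h : (pidx preferred).get? p.2 with
    | none =>
      refine List.mem_append.2 (Or.inr (List.mem_filter.2 ⟨hp, ?_⟩))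
      simp [h]
    | some r =>
      rcases pidx_rank preferred _ _ h with ⟨n, hn, rfl⟩
      refine List.mem_append.2 (Or.inl (List.mem_flatMap.2 ⟨n, List.mem_range.2 hn, ?_⟩))
      exact List.mem_filter.2 ⟨hp, by simp [h]⟩

-- B's fold invariant
theorem ov_fold_inv (pi : PySem.Dict Int Int) (N : Nat)
    (hpi : ∀ v r, pi.get? v = some r → ∃ n : Nat, n < N ∧ r = (n : Int)) :
    ∀ (vs : List Int) (bk : List (List Int)) (np : List Int), bk.length = N →
      (vs.foldl (ovStep pi) (bk, np)).1.length = N ∧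
      (∀ n : Nat, (vs.foldl (ovStep pi) (bk, np)).1.getD n [] =
        bk.getD n [] ++ vs.filter (fun v => pi.get? v == some (n : Int))) ∧
      (vs.foldl (ovStep pi) (bk, np)).2 = np ++ vs.filter (fun v => pi.get? v == none) := by
  intro vs
  induction vs with
  | nil => intro bk np hlen; exact ⟨hlen, fun n => by simp, by simp⟩
  | cons v t ih =>
    intro bk np hlen
    cases h : pi.get? v with
    | none =>
      have step : ovStep pi (bk, np) v = (bk, np ++ [v]) := by simp [ovStep, h]
      rw [List.foldl_cons, step]
      obtain ⟨h1, h2, h3⟩ := ih bk (np ++ [v]) hlen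
      refine ⟨h1, fun n => ?_, ?_⟩
      · rw [h2 n, List.filter_cons]
        simp [h]
      · rw [h3, List.filter_cons]
        simp [h]
    | some r =>
      obtain ⟨m, hm, rfl⟩ := hpi v _ h
      have step : ovStep pi (bk, np) v = (bk.set m (bk.getD m [] ++ [v]), np) := by
        simp [ovStep, h]
      rw [List.foldl_cons, step]
      obtain ⟨h1, h2, h3⟩ := ih (bk.set m (bk.getD m [] ++ [v])) np (by simp [hlen])
      refine ⟨h1, fun n => ?_, ?_⟩
      · rw [h2 n, List.filter_cons]
        by_cases hnm : n = m
        · subst hnm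
          have hset : (bk.set n (bk.getD n [] ++ [v])).getD n [] = bk.getD n [] ++ [v] := by
            rw [List.getD_eq_getElem?_getD, List.getElem?_set]
            simp [hlen ▸ hm]
          rw [hset]
          simp [h]
        · have hset : (bk.set m (bk.getD m [] ++ [v])).getD n [] = bk.getD n [] := by
            rw [List.getD_eq_getElem?_getD, List.getElem?_set, List.getD_eq_getElem?_getD,
              if_neg (fun hh : m = n => hnm hh.symm)]
            rw [List.getD_eq_getElem?_getD]
          rw [hset]
          have hne : ((pi.get? v == some (n : Int)) = false) := by
            rw [h]
            simp
            exact fun hh => hnm (by exact_mod_cast hh.symm)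
          simp [hne]
      · rw [h3, List.filter_cons]
        simp [h]

-- ===== VERDICT (by name: the statement is the Claim_ definition above) =====
theorem ordered_values_py_spec : Claim_equal_ordered_values_py := by
  unfold Claim_equal_ordered_values_py
  intro values preferred _
  dsimp only [Spec_ordered_values_py, ordered_values_py, ordered_values_py_alt]
  have hE := PySem.List.pairwise_lt_enumerate values (0 : Int)
  rw [PySem.List.sorted_eq_of_perm_of_pairwise_lt _ _ _ (bucketed_perm preferred _ hE)
      (bucketed_pairwise preferred _ hE)]
  unfold bucketed
  rw [List.map_append, List.map_flatMap]
  -- B's fold, characterised by the invariant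
  obtain ⟨h1, h2, h3⟩ := ov_fold_inv (pidx preferred) preferred.length
    (fun v r hv => pidx_rank preferred v r hv) values
    (preferred.map (fun _ => ([] : List Int))) [] (by simp)
  rw [PySem.List.foldl_append_eq_flatten, List.nil_append, h3, List.nil_append]
  have hbk : (values.foldl (ovStep (pidx preferred))
      (preferred.map (fun _ => ([] : List Int)), [])).1 =
      (List.range preferred.length).map
        (fun (n : Nat) => values.filter (fun v => (pidx preferred).get? v == some (n : Int))) := by
    apply List.ext_getElem
    · rw [h1]; simp
    · intro i hi _
      have hiN : i < preferred.length := by rwa [h1] at hi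
      have hL : (values.foldl (ovStep (pidx preferred))
          (preferred.map (fun _ => ([] : List Int)), [])).1.getD i [] =
          (values.foldl (ovStep (pidx preferred))
            (preferred.map (fun _ => ([] : List Int)), [])).1[i] := by
        rw [List.getD_eq_getElem?_getD, List.getElem?_eq_getElem hi]
        rfl
      have hbk0 : (preferred.map (fun _ => ([] : List Int))).getD i [] = [] := by
        rw [List.getD_eq_getElem?_getD, List.getElem?_eq_getElem (by simpa using hiN)]
        simp
      rw [← hL, h2 i, hbk0, List.nil_append]
      simp
  have hA1 : (List.flatMap
      (fun a : Nat => ((PySem.List.enumerate values).filter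
        (fun p => (pidx preferred).get? p.2 == some (a : Int))).map (·.2))
      (List.range preferred.length)) =
      List.flatMap
        (fun n : Nat => values.filter (fun v => (pidx preferred).get? v == some (n : Int)))
        (List.range preferred.length) :=
    congrArg (fun f => List.flatMap f (List.range preferred.length))
      (funext fun n => enum_filter_snd (fun v => (pidx preferred).get? v == some (n : Int)) values 0)
  rw [hbk, ← List.flatMap_def, hA1]
  congr 1
  exact enum_filter_snd (fun v => (pidx preferred).get? v == none) values 0
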